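-- pv_equiv track=rewrite | github.com/officialfelixmunyany-ctrl/joylandschools | backend/joyland/integrations/openai.py | _parse_assessment_questions
-- ===== SOURCE A (Python) =====
-- def _parse_assessment_questions(text: str) -> list:
--     """Parse the AI response into structured assessment questions."""
--     questions = []
--     current_question = {}
--
--     lines = text.strip().split('\n')
--     for line in lines:
--         line = line.strip()
--         if not line:
--             if current_question:
--                 questions.append(current_question)
--                 current_question = {}
--         elif line.startswith('Subject:'):
--             current_question['subject'] = line.split(':', 1)[1].strip()
--         elif line.startswith('Question:'):
--             current_question['question'] = line.split(':', 1)[1].strip()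
--         elif line.startswith('Learning Outcome:'):
--             current_question['outcome'] = line.split(':', 1)[1].strip()
--         elif line.startswith('Scoring:'):
--             current_question['scoring'] = line.split(':', 1)[1].strip()
--
--     if current_question:
--         questions.append(current_question)
--
--     return questions
-- ===== SOURCE B (Python) =====
-- _FIELDS = [
--     ('Subject:', 'subject'),
--     ('Question:', 'question'),
--     ('Learning Outcome:', 'outcome'),
--     ('Scoring:', 'scoring'),
-- ]
--
--
-- def _parse_assessment_questions(text: str) -> list:
--     """Parse the AI response into structured assessment questions.
--
--     Two stages: group stripped lines into blank-line-separated blocks,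
--     then turn each block into a dict of recognized fields, keeping the
--     non-empty dicts.
--     """
--     blocks = []
--     group = []
--     for raw in text.strip().split('\n'):
--         line = raw.strip()
--         if line:
--             group.append(line)
--         elif group:
--             blocks.append(group)
--             group = []
--     if group:
--         blocks.append(group)
--
--     result = []
--     for block in blocks:
--         question = {}
--         for line in block:
--             for prefix, key in _FIELDS:
--                 if line.startswith(prefix):
--                     question[key] = line.split(':', 1)[1].strip()
--                     break
--         if question:
--             result.append(question)
--     return result
-- ===== Notes on version B (the rewrite author's own statement) =====
-- stated objective: alternative
-- what changed: Replaces A's single interleaved state machine (questions list + mutable current dict flushed on blanks) by two staged passes: first group stripped lines into blank-separated blocks, then map each block to a dict via a prefix/key table scanned with a break, keeping non-empty dicts.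
import Mathlib
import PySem

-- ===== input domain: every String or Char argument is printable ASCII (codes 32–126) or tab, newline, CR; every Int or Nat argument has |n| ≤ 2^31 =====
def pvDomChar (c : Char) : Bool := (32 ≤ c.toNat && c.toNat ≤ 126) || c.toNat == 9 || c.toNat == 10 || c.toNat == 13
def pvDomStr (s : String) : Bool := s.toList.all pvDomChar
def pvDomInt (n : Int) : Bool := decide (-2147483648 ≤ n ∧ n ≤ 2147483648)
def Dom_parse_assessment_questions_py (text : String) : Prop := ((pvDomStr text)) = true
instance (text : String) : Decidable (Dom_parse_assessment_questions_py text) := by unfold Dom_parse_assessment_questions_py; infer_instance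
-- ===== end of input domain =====

-- B replaces A's single interleaved state machine by two staged passes (group lines into
-- blank-separated blocks, then map each block to a field dict via a prefix table); same values.

-- ===== PORT A =====
-- line.split(':', 1)[1].strip()  (the index 1 always exists on the branches that use it, since the matched prefix contains ':')
def pvAField (line : String) : String :=
  PySem.Str.strip (PySem.List.pyGetD ((PySem.Str.splitMax? line ":" 1).getD []) 1 "")

def pvAStep (st : List (PySem.Dict String String) × PySem.Dict String String) (raw : String) :
    List (PySem.Dict String String) × PySem.Dict String String :=
  let line := PySem.Str.strip raw
  if line = "" then
    if st.2.items = [] then st else (st.1 ++ [st.2], PySem.Dict.empty)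
  else if PySem.Str.startswith line "Subject:" then
    (st.1, st.2.insert "subject" (pvAField line))
  else if PySem.Str.startswith line "Question:" then
    (st.1, st.2.insert "question" (pvAField line))
  else if PySem.Str.startswith line "Learning Outcome:" then
    (st.1, st.2.insert "outcome" (pvAField line))
  else if PySem.Str.startswith line "Scoring:" then
    (st.1, st.2.insert "scoring" (pvAField line))
  else st

def parse_assessment_questions_py (text : String) : List (List (String × String)) :=
  let lines := (PySem.Str.split? (PySem.Str.strip text) "\n").getD []
  let st := lines.foldl pvAStep ([], PySem.Dict.empty)
  let questions := if st.2.items = [] then st.1 else st.1 ++ [st.2]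
  questions.map (fun q => q.items)

-- ===== PORT B =====
def pvFields : List (String × String) :=
  [("Subject:", "subject"), ("Question:", "question"),
   ("Learning Outcome:", "outcome"), ("Scoring:", "scoring")]

def pvBField (line : String) : String :=
  PySem.Str.strip (PySem.List.pyGetD ((PySem.Str.splitMax? line ":" 1).getD []) 1 "")

-- the inner 'for prefix, key in _FIELDS: … break' loop
def pvBSet (fields : List (String × String)) (q : PySem.Dict String String) (line : String) :
    PySem.Dict String String :=
  match fields with
  | [] => q
  | (p, k) :: rest =>
    if PySem.Str.startswith line p then q.insert k (pvBField line) else pvBSet rest q line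

-- stage 1: accumulate (blocks, current group) over the lines
def pvGStep (st : List (List String) × List String) (raw : String) :
    List (List String) × List String :=
  let line := PySem.Str.strip raw
  if line ≠ "" then (st.1, st.2 ++ [line])
  else if st.2 = [] then st
  else (st.1 ++ [st.2], ([] : List String))

-- stage 2: one block to its dict
def pvDictOf (block : List String) : PySem.Dict String String :=
  block.foldl (pvBSet pvFields) PySem.Dict.empty

def pvCollect (res : List (PySem.Dict String String)) (block : List String) :
    List (PySem.Dict String String) :=
  let q := pvDictOf block
  if q.items = [] then res else res ++ [q]

def parse_assessment_questions_py_alt (text : String) : List (List (String × String)) :=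
  let g := ((PySem.Str.split? (PySem.Str.strip text) "\n").getD []).foldl pvGStep ([], [])
  let blocks := if g.2 = [] then g.1 else g.1 ++ [g.2]
  (blocks.foldl pvCollect []).map (fun q => q.items)

-- ===== PRECONDITION & SPEC =====
def Spec_parse_assessment_questions_py (text : String) (out : List (List (String × String))) : Prop :=
  out = parse_assessment_questions_py_alt text
instance (text : String) (out : List (List (String × String))) :
    Decidable (Spec_parse_assessment_questions_py text out) := by
  unfold Spec_parse_assessment_questions_py; infer_instance

-- ===== CLAIM (what is proved, stated in full; the proofs are below) =====
def Claim_equal_parse_assessment_questions_py : Prop :=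
  ∀ (text : String), Dom_parse_assessment_questions_py text →
    Spec_parse_assessment_questions_py text (parse_assessment_questions_py text)

-- ===== LEMMAS AND PROOFS =====
def pvFinA (st : List (PySem.Dict String String) × PySem.Dict String String) :
    List (PySem.Dict String String) :=
  if st.2.items = [] then st.1 else st.1 ++ [st.2]

def pvFinG (st : List (List String) × List String) : List (List String) :=
  if st.2 = [] then st.1 else st.1 ++ [st.2]

lemma pvEmptyOfItems (q : PySem.Dict String String) (h : q.items = []) : q = PySem.Dict.empty :=
  PySem.Dict.ext (by rw [h]; rfl)

lemma pvDictOf_append (g : List String) (l : String) :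
    pvDictOf (g ++ [l]) = pvBSet pvFields (pvDictOf g) l := by
  simp [pvDictOf, List.foldl_append]

lemma pvFinG_cons (g : List String) (bs : List (List String)) (gg : List String) :
    pvFinG (g :: bs, gg) = g :: pvFinG (bs, gg) := by
  by_cases h : gg = [] <;> simp [pvFinG, h]

set_option maxHeartbeats 1000000 in
lemma pvStepAgree (qs : List (PySem.Dict String String)) (q : PySem.Dict String String)
    (raw : String) (hl : ¬ PySem.Str.strip raw = "") :
    pvAStep (qs, q) raw = (qs, pvBSet pvFields q (PySem.Str.strip raw)) := by
  simp only [pvAStep, if_neg hl]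
  simp only [pvBSet, pvFields, pvAField, pvBField]
  split_ifs <;> rfl

lemma pvGShift (raws : List String) (bs : List (List String)) (g : List String) :
    raws.foldl pvGStep (bs, g) =
      (bs ++ (raws.foldl pvGStep ([], g)).1, (raws.foldl pvGStep ([], g)).2) := by
  induction raws generalizing bs g with
  | nil => simp
  | cons raw raws ih =>
    simp only [List.foldl_cons]
    by_cases hl : PySem.Str.strip raw = ""
    · by_cases hg : g = []
      · subst hg
        have h1 : pvGStep (bs, ([] : List String)) raw = (bs, []) := by simp [pvGStep, hl]
        have h2 : pvGStep (([] : List (List String)), ([] : List String)) raw = ([], []) := by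
          simp [pvGStep, hl]
        rw [h1, h2]; exact ih bs []
      · have h1 : pvGStep (bs, g) raw = (bs ++ [g], []) := by simp [pvGStep, hl, hg]
        have h2 : pvGStep (([] : List (List String)), g) raw = ([g], []) := by
          simp [pvGStep, hl, hg]
        rw [h1, h2, ih (bs ++ [g]) [], ih [g] []]
        simp
    · have h1 : pvGStep (bs, g) raw = (bs, g ++ [PySem.Str.strip raw]) := by simp [pvGStep, hl]
      have h2 : pvGStep (([] : List (List String)), g) raw = ([], g ++ [PySem.Str.strip raw]) := by
        simp [pvGStep, hl]
      rw [h1, h2]; exact ih bs (g ++ [PySem.Str.strip raw])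

lemma pvCShift (blks : List (List String)) (acc : List (PySem.Dict String String)) :
    blks.foldl pvCollect acc = acc ++ blks.foldl pvCollect [] := by
  induction blks generalizing acc with
  | nil => simp
  | cons b blks ih =>
    simp only [List.foldl_cons, pvCollect]
    by_cases hb : (pvDictOf b).items = []
    · rw [if_pos hb, if_pos hb]; exact ih acc
    · rw [if_neg hb, if_neg hb, ih (acc ++ [pvDictOf b]), ih ([] ++ [pvDictOf b])]
      simp

lemma pvMain (raws : List String) (qs : List (PySem.Dict String String)) (g : List String) :
    pvFinA (raws.foldl pvAStep (qs, pvDictOf g)) =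
      qs ++ (pvFinG (raws.foldl pvGStep ([], g))).foldl pvCollect [] := by
  induction raws generalizing qs g with
  | nil =>
    by_cases hg : g = []
    · subst hg
      have hE : (PySem.Dict.empty : PySem.Dict String String).items = [] := rfl
      simp [pvFinA, pvFinG, pvDictOf, hE]
    · by_cases hi : (pvDictOf g).items = []
      · simp [pvFinA, pvFinG, pvCollect, hg, hi]
      · simp [pvFinA, pvFinG, pvCollect, hg, hi]
  | cons raw raws ih =>
    simp only [List.foldl_cons]
    by_cases hl : PySem.Str.strip raw = ""
    · by_cases hi : (pvDictOf g).items = []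
      · have he : pvDictOf g = PySem.Dict.empty := pvEmptyOfItems _ hi
        have hA : pvAStep (qs, pvDictOf g) raw = (qs, pvDictOf g) := by simp [pvAStep, hl, hi]
        have hDE : (PySem.Dict.empty : PySem.Dict String String) = pvDictOf [] := rfl
        rw [hA, he, hDE]
        by_cases hg : g = []
        · have hG : pvGStep (([] : List (List String)), g) raw = ([], []) := by
            simp [pvGStep, hl, hg]
          rw [hG]; exact ih qs []
        · have hG : pvGStep (([] : List (List String)), g) raw = ([g], []) := by
            simp [pvGStep, hl, hg]
          rw [hG, pvGShift raws [g] [], ih qs []]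
          congr 1
          rw [List.singleton_append, pvFinG_cons, Prod.mk.eta, List.foldl_cons,
            show pvCollect [] g = [] by simp [pvCollect, hi]]
      · have hg : g ≠ [] := fun h => hi (by rw [h]; rfl)
        have hA : pvAStep (qs, pvDictOf g) raw = (qs ++ [pvDictOf g], PySem.Dict.empty) := by
          simp [pvAStep, hl, hi]
        have hDE : (PySem.Dict.empty : PySem.Dict String String) = pvDictOf [] := rfl
        have hG : pvGStep (([] : List (List String)), g) raw = ([g], []) := by
          simp [pvGStep, hl, hg]
        rw [hA, hDE, hG, ih (qs ++ [pvDictOf g]) [], pvGShift raws [g] [], List.append_assoc]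
        congr 1
        conv_rhs => rw [List.singleton_append, pvFinG_cons, Prod.mk.eta, List.foldl_cons]
        rw [show pvCollect [] g = [pvDictOf g] by simp [pvCollect, hi],
          pvCShift (pvFinG (raws.foldl pvGStep ([], []))) [pvDictOf g],
          List.singleton_append]
    · have hG : pvGStep (([] : List (List String)), g) raw = ([], g ++ [PySem.Str.strip raw]) := by
        simp [pvGStep, hl]
      rw [pvStepAgree qs (pvDictOf g) raw hl, ← pvDictOf_append, hG]
      exact ih qs (g ++ [PySem.Str.strip raw])

-- ===== VERDICT (by name: the statement is the Claim_ definition above) =====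
set_option maxHeartbeats 1000000 in
theorem parse_assessment_questions_py_spec : Claim_equal_parse_assessment_questions_py := by
  intro text _
  unfold Spec_parse_assessment_questions_py
  simp only [parse_assessment_questions_py, parse_assessment_questions_py_alt]
  have h := pvMain ((PySem.Str.split? (PySem.Str.strip text) "\n").getD []) [] []
  simp only [pvFinA, pvFinG, pvDictOf, List.foldl_nil, List.nil_append] at h
  rw [h]
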